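-- pv_equiv track=rewrite | github.com/SU-IoT-Spring-26/api | main.py | _parse_thermal_blob_meta
-- ===== SOURCE A (Python) =====
-- def _parse_thermal_blob_meta(filename: str) -> tuple:
--     """Parse (safe_id, timestamp_iso) from a thermal frame filename.
--
--     Pattern: thermal_{safe_id}_{YYYYMMDD}_{HHMMSS}_{ms}_compact.json(.gz)
--     Returns ("", "") when the filename does not match.
--     """
--     stem = filename
--     for suffix in ("_compact.json.gz", "_compact.json"):
--         if stem.endswith(suffix):
--             stem = stem[: -len(suffix)]
--             break
--     parts = stem.split("_")
--     for i, p in enumerate(parts):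
--         if (
--             len(p) == 8
--             and p.isdigit()
--             and i + 1 < len(parts)
--             and len(parts[i + 1]) == 6
--             and parts[i + 1].isdigit()
--         ):
--             date_p, time_p = p, parts[i + 1]
--             ts_iso = (
--                 f"{date_p[:4]}-{date_p[4:6]}-{date_p[6:]}"
--                 f"T{time_p[:2]}:{time_p[2:4]}:{time_p[4:]}"
--             )
--             safe_id = "_".join(parts[1:i])
--             return safe_id, ts_iso
--     return "", ""
-- ===== SOURCE B (Python) =====
-- def _parse_thermal_blob_meta(filename: str) -> tuple:
--     """Parse (safe_id, timestamp_iso) from a thermal frame filename.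
--
--     Instead of splitting into tokens, scan candidate token-start positions
--     (0 and each position after an underscore, via str.find) for the literal
--     whole-token shape (8 digits, separator, 6 digits), then slice the safe_id
--     out of the stem directly.
--     """
--     stem = filename
--     if stem.endswith("_compact.json.gz"):
--         stem = stem[:-16]
--     elif stem.endswith("_compact.json"):
--         stem = stem[:-13]
--     n = len(stem)
--     j = 0
--     while True:
--         if (
--             n >= j + 15
--             and stem[j + 8] == "_"
--             and stem[j:j + 8].isdigit()
--             and stem[j + 9:j + 15].isdigit()
--             and (j + 15 == n or stem[j + 15] == "_")
--         ):
--             d = stem[j:j + 8]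
--             t = stem[j + 9:j + 15]
--             ts_iso = "-".join((d[:4], d[4:6], d[6:])) + "T" + ":".join((t[:2], t[2:4], t[4:]))
--             safe_id = stem[stem.find("_") + 1:j - 1] if j > 0 else ""
--             return safe_id, ts_iso
--         u = stem.find("_", j)
--         if u == -1:
--             return "", ""
--         j = u + 1
-- ===== Notes on version B (the rewrite author's own statement) =====
-- stated objective: alternative
-- what changed: B replaces A's split-into-token-list-and-scan (split on underscore, enumerate, join of a token slice) by a direct character-position scan of the stem: candidate token starts (0 and each position after an underscore, advanced with str.find) are tested for the whole-token shape of 8 digits, separator, 6 digits, and safe_id is sliced directly out of the stem between the first underscore and the match.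
import Mathlib
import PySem

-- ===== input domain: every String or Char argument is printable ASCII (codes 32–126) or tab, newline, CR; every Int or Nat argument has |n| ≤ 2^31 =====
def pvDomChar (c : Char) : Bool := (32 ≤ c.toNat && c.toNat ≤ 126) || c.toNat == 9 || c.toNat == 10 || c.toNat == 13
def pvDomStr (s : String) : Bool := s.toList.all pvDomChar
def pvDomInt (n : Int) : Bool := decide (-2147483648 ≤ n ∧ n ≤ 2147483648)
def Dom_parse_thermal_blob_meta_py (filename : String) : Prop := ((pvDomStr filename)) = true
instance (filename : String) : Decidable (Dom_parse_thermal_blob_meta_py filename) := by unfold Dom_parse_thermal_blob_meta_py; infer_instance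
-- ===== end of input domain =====

-- B replaces A's split-into-tokens-and-scan by a direct character-position scan of the stem
-- (candidate starts = 0 and each position after an underscore, via find), slicing safe_id out
-- of the stem; objective: alternative (no measured speed claim).

-- ===== PORT A =====
-- A: strip "_compact.json(.gz)", split on "_", scan tokens for an 8-digit token followed
-- by a 6-digit token; safe_id = "_".join(parts[1:i]).
def pvA_iso (d t : List Char) : List Char :=
  PySem.List.slice d none (some 4) ++ ['-'] ++ PySem.List.slice d (some 4) (some 6)
    ++ ['-'] ++ PySem.List.slice d (some 6) none
    ++ ['T'] ++ PySem.List.slice t none (some 2) ++ [':'] ++ PySem.List.slice t (some 2) (some 4)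
    ++ [':'] ++ PySem.List.slice t (some 4) none

def pvA_loop (parts : List (List Char)) : Nat → List (List Char) → List Char × List Char
  | _, [] => ([], [])
  | i, p :: rest =>
    let q := PySem.List.pyGetD parts ((i : Int) + 1) []
    if p.length == 8 && PySem.Chars.strIsdigit p && decide (i + 1 < parts.length)
        && q.length == 6 && PySem.Chars.strIsdigit q then
      (PySem.Chars.join ['_'] (PySem.List.slice parts (some 1) (some (i : Int))), pvA_iso p q)
    else
      pvA_loop parts (i + 1) rest

def parse_thermal_blob_meta_py (filename : String) : String × String :=
  let stem0 := filename.toList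
  let stem :=
    if PySem.Chars.endswith stem0 "_compact.json.gz".toList then
      PySem.List.slice stem0 none (some (-16))
    else if PySem.Chars.endswith stem0 "_compact.json".toList then
      PySem.List.slice stem0 none (some (-13))
    else stem0
  let parts := PySem.Chars.splitOn stem ['_']
  let r := pvA_loop parts 0 parts
  (String.ofList r.1, String.ofList r.2)

-- ===== PORT B =====
-- B: same stripping, then scan candidate start positions j (0, then each underscore's
-- successor found with find) for the whole-token shape (8 digits, separator, 6 digits); safe_id is sliced
-- directly out of the stem.  Fuel = stem.length + 1 only makes the while-loop structural
-- (j strictly increases each round).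
def pvB_iso (d t : List Char) : List Char :=
  PySem.Chars.join ['-']
      [PySem.List.slice d none (some 4), PySem.List.slice d (some 4) (some 6),
        PySem.List.slice d (some 6) none]
    ++ 'T' :: PySem.Chars.join [':']
      [PySem.List.slice t none (some 2), PySem.List.slice t (some 2) (some 4),
        PySem.List.slice t (some 4) none]

def pvB_loop (stem : List Char) : Nat → Nat → List Char × List Char
  | 0, _ => ([], [])
  | fuel + 1, j =>
    let n := stem.length
    if decide (n ≥ j + 15)
        && (PySem.List.pyGet? stem ((j : Int) + 8) == some '_')
        && PySem.Chars.strIsdigit (PySem.List.slice stem (some (j : Int)) (some ((j : Int) + 8)))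
        && PySem.Chars.strIsdigit (PySem.List.slice stem (some ((j : Int) + 9)) (some ((j : Int) + 15)))
        && (decide (j + 15 = n) || (PySem.List.pyGet? stem ((j : Int) + 15) == some '_')) then
      let d := PySem.List.slice stem (some (j : Int)) (some ((j : Int) + 8))
      let t := PySem.List.slice stem (some ((j : Int) + 9)) (some ((j : Int) + 15))
      let sid :=
        if 0 < j then
          PySem.List.slice stem (some (PySem.Chars.find stem ['_'] + 1)) (some ((j : Int) - 1))
        else []
      (sid, pvB_iso d t)
    else
      let u := PySem.Chars.findFrom stem ['_'] (j : Int) none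
      if u == -1 then ([], [])
      else pvB_loop stem fuel (u.toNat + 1)

def parse_thermal_blob_meta_py_alt (filename : String) : String × String :=
  let stem0 := filename.toList
  let stem :=
    if PySem.Chars.endswith stem0 "_compact.json.gz".toList then
      PySem.List.slice stem0 none (some (-16))
    else if PySem.Chars.endswith stem0 "_compact.json".toList then
      PySem.List.slice stem0 none (some (-13))
    else stem0
  let r := pvB_loop stem (stem.length + 1) 0
  (String.ofList r.1, String.ofList r.2)

-- ===== PRECONDITION & SPEC =====
def Spec_parse_thermal_blob_meta_py (filename : String) (out : String × String) : Prop := out = parse_thermal_blob_meta_py_alt filename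
instance (filename : String) (out : String × String) : Decidable (Spec_parse_thermal_blob_meta_py filename out) := by unfold Spec_parse_thermal_blob_meta_py; infer_instance

-- ===== CLAIM (what is proved, stated in full; the proofs are below) =====
def Claim_equal_parse_thermal_blob_meta_py : Prop := ∀ (filename : String), Dom_parse_thermal_blob_meta_py filename → Spec_parse_thermal_blob_meta_py filename (parse_thermal_blob_meta_py filename)

-- ===== LEMMAS AND PROOFS =====

def pvTok : List Char → List (List Char)
  | [] => [[]]
  | c :: r =>
    if c = '_' then [] :: pvTok r
    else
      match pvTok r with
      | [] => [[c]]
      | t :: ts => (c :: t) :: ts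

def pvJoin : List (List Char) → List Char
  | [] => []
  | [t] => t
  | t :: ts => t ++ '_' :: pvJoin ts

theorem pvTok_ne_nil (cs : List Char) : pvTok cs ≠ [] := by
  cases cs with
  | nil => simp [pvTok]
  | cons c r =>
    simp only [pvTok]
    split
    · simp
    · split <;> simp

theorem pvGo_spec (l : List Char) : ∀ (fuel : Nat) (cur : List Char) (acc : List (List Char)),
    l.length < fuel →
    PySem.Chars.splitOn.go ['_'] fuel l cur acc
      = acc.reverse ++ (match pvTok l with
        | [] => []
        | t :: ts => (cur.reverse ++ t) :: ts) := by
  induction l with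
  | nil =>
    intro fuel cur acc h
    match fuel with
    | fuel + 1 => simp [PySem.Chars.splitOn.go, pvTok]
  | cons c rest ih =>
    intro fuel cur acc h
    match fuel with
    | fuel + 1 =>
      rw [PySem.Chars.splitOn.go]
      by_cases hc : c = '_'
      · subst hc
        simp only [List.isPrefixOf, beq_self_eq_true, Bool.and_true, if_true, List.length_cons,
          List.length_nil, List.drop_succ_cons, List.drop_zero]
        rw [ih fuel [] (cur.reverse :: acc) (by simpa using h)]
        cases htok : pvTok rest with
        | nil => exact absurd htok (pvTok_ne_nil rest)
        | cons t ts => simp [pvTok, htok]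
      · have hb : ('_' == c) = false := by simpa using fun he => hc he.symm
        simp only [List.isPrefixOf, hb, Bool.false_and]
        rw [ih fuel (c :: cur) acc (by simpa using h)]
        cases htok : pvTok rest with
        | nil => exact absurd htok (pvTok_ne_nil rest)
        | cons t ts => simp [pvTok, hc, htok]

theorem pvSplitOn_eq_tok (cs : List Char) : PySem.Chars.splitOn cs ['_'] = pvTok cs := by
  rw [PySem.Chars.splitOn, pvGo_spec cs (cs.length + 1) [] [] (by omega)]
  cases htok : pvTok cs with
  | nil => exact absurd htok (pvTok_ne_nil cs)
  | cons t ts => simp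

theorem pvTok_no_sep (cs : List Char) : ∀ t ∈ pvTok cs, '_' ∉ t := by
  induction cs with
  | nil => simp [pvTok]
  | cons c rest ih =>
    by_cases hc : c = '_'
    · subst hc
      simp only [pvTok, if_true]
      intro t ht
      rcases List.mem_cons.mp ht with h | h
      · simp [h]
      · exact ih t h
    · simp only [pvTok, if_neg hc]
      cases htok : pvTok rest with
      | nil => exact absurd htok (pvTok_ne_nil rest)
      | cons t0 ts =>
        intro t ht
        rcases List.mem_cons.mp ht with h | h
        · subst h
          intro hm
          rcases List.mem_cons.mp hm with h | h
          · exact hc h.symm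
          · exact ih t0 (htok ▸ List.mem_cons_self ..) h
        · exact ih t (htok ▸ List.mem_cons_of_mem _ h)

theorem pvTok_join (cs : List Char) : pvJoin (pvTok cs) = cs := by
  induction cs with
  | nil => simp [pvTok, pvJoin]
  | cons c rest ih =>
    by_cases hc : c = '_'
    · subst hc
      simp only [pvTok, if_true]
      cases htok : pvTok rest with
      | nil => exact absurd htok (pvTok_ne_nil rest)
      | cons t ts =>
        rw [htok] at ih
        simp [pvJoin, ih]
    · simp only [pvTok, if_neg hc]
      cases htok : pvTok rest with
      | nil => exact absurd htok (pvTok_ne_nil rest)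
      | cons t ts =>
        rw [htok] at ih
        cases ts with
        | nil => simp_all [pvJoin]
        | cons t1 ts1 => simp_all [pvJoin]

theorem pvJoin_eq (ts : List (List Char)) : PySem.Chars.join ['_'] ts = pvJoin ts := by
  induction ts with
  | nil => simp [PySem.Chars.join, pvJoin, List.intercalate]
  | cons t ts ih =>
    cases ts with
    | nil => simp [PySem.Chars.join, pvJoin, List.intercalate]
    | cons t1 ts1 =>
      rw [PySem.Chars.join] at ih ⊢
      rw [show List.intercalate ['_'] (t :: t1 :: ts1) = t ++ '_' :: List.intercalate ['_'] (t1 :: ts1) from by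
        simp [List.intercalate], ih]
      simp [pvJoin]

theorem pvSingleton_infix_iff (t : List Char) : ['_'] <:+: t ↔ '_' ∈ t := by
  constructor
  · intro h
    exact h.sublist.subset (by simp)
  · intro h
    obtain ⟨s, u, rfl⟩ := List.append_of_mem h
    exact ⟨s, u, by simp⟩

theorem pvFind_eq_neg_one {t : List Char} (h : '_' ∉ t) : PySem.Chars.find t ['_'] = -1 := by
  rw [PySem.Chars.find_eq_neg_one_iff]
  rw [pvSingleton_infix_iff]
  exact h

theorem pvFind_eq_len {t rest : List Char} (h : '_' ∉ t) :
    PySem.Chars.find (t ++ '_' :: rest) ['_'] = (t.length : Int) := by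
  have hinf : ['_'] <:+: t ++ '_' :: rest := ⟨t, rest, by simp⟩
  have h0 : 0 ≤ PySem.Chars.find (t ++ '_' :: rest) ['_'] :=
    (PySem.Chars.find_nonneg_iff _ _).mpr hinf
  obtain ⟨hpre, hmin⟩ := PySem.Chars.find_spec h0
  set k := (PySem.Chars.find (t ++ '_' :: rest) ['_']).toNat with hk
  rcases lt_trichotomy k t.length with hlt | heq | hgt
  · exfalso
    rw [List.drop_append_of_le_length (by omega), List.drop_eq_getElem_cons hlt] at hpre
    rcases List.cons_prefix_cons.mp hpre with ⟨he, -⟩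
    exact h (he ▸ List.getElem_mem hlt)
  · omega
  · exfalso
    refine hmin t.length hgt ?_
    rw [List.drop_left]
    exact ⟨rest, rfl⟩

def pvStart (ts1 : List (List Char)) : Nat :=
  match ts1 with
  | [] => 0
  | _ => (pvJoin ts1).length + 1

theorem pvJoin_cons (t : List Char) (ts : List (List Char)) (h : ts ≠ []) :
    pvJoin (t :: ts) = t ++ '_' :: pvJoin ts := by
  cases ts with
  | nil => exact absurd rfl h
  | cons a as => rfl

theorem pvJoin_append (ts1 ts2 : List (List Char)) (h1 : ts1 ≠ []) (h2 : ts2 ≠ []) :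
    pvJoin (ts1 ++ ts2) = pvJoin ts1 ++ '_' :: pvJoin ts2 := by
  induction ts1 with
  | nil => exact absurd rfl h1
  | cons t0 ts1' ih =>
    cases ts1' with
    | nil =>
      simp only [List.singleton_append]
      rw [pvJoin_cons t0 ts2 h2]
      rfl
    | cons t1 ts1'' =>
      rw [List.cons_append, pvJoin_cons t0 ((t1 :: ts1'') ++ ts2) (by simp),
        pvJoin_cons t0 (t1 :: ts1'') (by simp), ih (by simp)]
      simp

theorem pvStart_append_singleton (ts1 : List (List Char)) (t : List Char) :
    pvStart (ts1 ++ [t]) = pvStart ts1 + t.length + 1 := by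
  cases ts1 with
  | nil => simp [pvStart, pvJoin]
  | cons a as =>
    have h := pvJoin_append (a :: as) [t] (by simp) (by simp)
    simp only [List.cons_append] at h ⊢
    simp [pvStart, h, pvJoin]
    omega

def pvOk? (t : List Char) (rest : List (List Char)) : Bool :=
  match rest with
  | [] => false
  | q :: _ => (t.length == 8) && PySem.Chars.strIsdigit t
      && (q.length == 6) && PySem.Chars.strIsdigit q

theorem pvBcond_eq (t : List Char) (rest : List (List Char)) (ht : '_' ∉ t)
    (hr : ∀ r ∈ rest, '_' ∉ r) :
    (decide ((pvJoin (t :: rest)).length ≥ 15)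
      && ((pvJoin (t :: rest))[8]? == some '_')
      && PySem.Chars.strIsdigit ((pvJoin (t :: rest)).take 8)
      && PySem.Chars.strIsdigit (((pvJoin (t :: rest)).drop 9).take 6)
      && (decide ((pvJoin (t :: rest)).length = 15) || ((pvJoin (t :: rest))[15]? == some '_')))
      = pvOk? t rest := by
  have digit_iff : ∀ l : List Char, PySem.Chars.strIsdigit l = true ↔
      (l ≠ [] ∧ ∀ c ∈ l, PySem.Chars.isdigit c = true) := by
    intro l
    simp [PySem.Chars.strIsdigit, List.all_eq_true]
  cases rest with
  | nil =>
    have hg : ((pvJoin [t])[8]? == some '_') = false := by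
      show ((t : List Char)[8]? == some '_') = false
      cases hgE : t[8]? with
      | none => rfl
      | some c =>
        have hcm : c ∈ t := List.mem_of_getElem? hgE
        have : c ≠ '_' := fun h => ht (h ▸ hcm)
        simp [this]
    simp only [pvOk?]
    rw [Bool.eq_false_iff]
    intro hL
    simp only [Bool.and_eq_true] at hL
    rw [hg] at hL
    simp at hL
  | cons q rest' =>
    rw [pvJoin_cons t (q :: rest') (by simp)]
    set s2 := pvJoin (q :: rest') with hs2def
    have hq : '_' ∉ q := hr q (by simp)
    have hs2q : s2 = q ++ (if rest' = [] then [] else '_' :: pvJoin rest') := by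
      cases rest' with
      | nil => simp [hs2def, pvJoin]
      | cons r rs =>
        rw [hs2def, pvJoin_cons q (r :: rs) (by simp)]
        simp
    rw [Bool.eq_iff_iff]
    simp only [pvOk?, Bool.and_eq_true, decide_eq_true_eq, Bool.or_eq_true, beq_iff_eq]
    constructor
    · rintro ⟨⟨⟨⟨c1, c2⟩, c3⟩, c4⟩, c5⟩
      -- t has length exactly 8
      have hlen8 : t.length = 8 := by
        rcases lt_trichotomy t.length 8 with hl | he | hg8
        · exfalso
          have hmem : '_' ∈ (t ++ '_' :: s2).take 8 := by
            rw [List.take_append]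
            refine List.mem_append_right _ ?_
            rw [show 8 - t.length = (8 - t.length - 1) + 1 from by omega, List.take_succ_cons]
            exact List.mem_cons_self ..
          have := ((digit_iff _).mp c3).2 '_' hmem
          simp [PySem.Chars.isdigit] at this
        · exact he
        · exfalso
          rw [List.getElem?_append_left hg8] at c2
          exact ht (List.mem_of_getElem? c2)
      have htake8 : (t ++ '_' :: s2).take 8 = t := List.take_left' hlen8
      have hdrop9 : (t ++ '_' :: s2).drop 9 = s2 := by
        rw [show t ++ '_' :: s2 = (t ++ ['_']) ++ s2 from by simp,
          List.drop_left' (by simp [hlen8])]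
      rw [hdrop9] at c4
      have hlen6 : q.length = 6 := by
        cases hrE : rest' with
        | nil =>
          rw [hrE] at hs2q
          simp at hs2q
          rcases lt_trichotomy q.length 6 with hl | he | hg6
          · exfalso
            simp [hs2q, hlen8] at c1
            omega
          · exact he
          · exfalso
            rcases c5 with c5 | c5
            · simp [hs2q, hlen8] at c5 <;> omega
            · rw [List.getElem?_append_right (by omega)] at c5
              simp only [hlen8] at c5
              rw [show (15 : Nat) - 8 = 7 from rfl, List.getElem?_cons_succ] at c5
              rw [hs2q] at c5
              exact hq (List.mem_of_getElem? c5)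
        | cons r rs =>
          rw [hrE] at hs2q
          simp at hs2q
          rcases lt_trichotomy q.length 6 with hl | he | hg6
          · exfalso
            have hmem : '_' ∈ s2.take 6 := by
              rw [hs2q, List.take_append]
              refine List.mem_append_right _ ?_
              rw [show 6 - q.length = (6 - q.length - 1) + 1 from by omega, List.take_succ_cons]
              exact List.mem_cons_self ..
            have := ((digit_iff _).mp c4).2 '_' hmem
            simp [PySem.Chars.isdigit] at this
          · exact he
          · exfalso
            rcases c5 with c5 | c5
            · rw [hs2q] at c5
              simp [hlen8] at c5
              omega
            · rw [List.getElem?_append_right (by omega)] at c5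
              simp only [hlen8] at c5
              rw [show (15 : Nat) - 8 = 7 from rfl, List.getElem?_cons_succ] at c5
              rw [hs2q, List.getElem?_append_left (by omega)] at c5
              exact hq (List.mem_of_getElem? c5)
      have htake6 : s2.take 6 = q := by
        cases hrE : rest' with
        | nil => rw [hrE] at hs2q; simp at hs2q
                 rw [hs2q, ← hlen6, List.take_length]
        | cons r rs => rw [hrE] at hs2q; simp at hs2q
                       rw [hs2q, List.take_left' hlen6]
      rw [htake8] at c3
      rw [htake6] at c4
      exact ⟨⟨⟨by simp [hlen8], c3⟩, by simp [hlen6]⟩, c4⟩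
    · rintro ⟨⟨⟨h8, hdt⟩, h6⟩, hdq⟩
      have hlen8 : t.length = 8 := by simpa using h8
      have hlen6 : q.length = 6 := by simpa using h6
      have htake8 : (t ++ '_' :: s2).take 8 = t := List.take_left' hlen8
      have hdrop9 : (t ++ '_' :: s2).drop 9 = s2 := by
        rw [show t ++ '_' :: s2 = (t ++ ['_']) ++ s2 from by simp,
          List.drop_left' (by simp [hlen8])]
      have hs2len : 6 ≤ s2.length := by rw [hs2q]; cases rest' <;> simp [hlen6]
      refine ⟨⟨⟨⟨?_, ?_⟩, ?_⟩, ?_⟩, ?_⟩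
      · simp [hlen8]; omega
      · rw [List.getElem?_append_right (by omega), hlen8]
        simp
      · rw [htake8]; exact hdt
      · rw [hdrop9]
        cases hrE : rest' with
        | nil => rw [hrE] at hs2q; simp at hs2q
                 rw [hs2q, ← hlen6, List.take_length]; exact hdq
        | cons r rs => rw [hrE] at hs2q; simp at hs2q
                       rw [hs2q, List.take_left' hlen6]; exact hdq
      · cases hrE : rest' with
        | nil =>
          rw [hrE] at hs2q; simp at hs2q
          left; simp [hs2q, hlen8, hlen6]
        | cons r rs =>
          rw [hrE] at hs2q; simp at hs2q
          right
          rw [List.getElem?_append_right (by omega), hlen8,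
            show (15 : Nat) - 8 = 7 from rfl, List.getElem?_cons_succ,
            hs2q, List.getElem?_append_right (by omega), hlen6]
          simp

theorem pvIso_eq (d t : List Char) : pvA_iso d t = pvB_iso d t := by
  simp [pvA_iso, pvB_iso, PySem.Chars.join, List.intercalate]

theorem pvMain (stem : List Char) (ts2 : List (List Char)) : ∀ (ts1 : List (List Char)) (fuel : Nat),
    (∀ t ∈ ts1 ++ ts2, '_' ∉ t) → ts2 ≠ [] →
    stem = pvJoin (ts1 ++ ts2) →
    stem.length - pvStart ts1 < fuel →
    pvA_loop (ts1 ++ ts2) ts1.length ts2 = pvB_loop stem fuel (pvStart ts1) := by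
  induction ts2 with
  | nil => intro ts1 fuel _ hne _ _; exact absurd rfl hne
  | cons t rest ih =>
    intro ts1 fuel hsep hne hstem hfuel
    obtain ⟨f, rfl⟩ : ∃ f, fuel = f + 1 := ⟨fuel - 1, by omega⟩
    have ht : '_' ∉ t := hsep t (by simp)
    have hr : ∀ r ∈ rest, '_' ∉ r := fun r h => hsep r (by simp [h])
    obtain ⟨pre, hpre, hprelen⟩ :
        ∃ pre : List Char, stem = pre ++ pvJoin (t :: rest) ∧ pre.length = pvStart ts1 := by
      cases hts1 : ts1 with
      | nil => exact ⟨[], by simpa [hts1] using hstem, by simp [pvStart]⟩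
      | cons a as =>
        refine ⟨pvJoin ts1 ++ ['_'], ?_, ?_⟩
        · rw [hstem, pvJoin_append ts1 (t :: rest) (by simp [hts1]) (by simp)]
          simp
        · simp [hts1, pvStart]
    have hdrop : stem.drop (pvStart ts1) = pvJoin (t :: rest) := by
      rw [hpre, List.drop_left' hprelen]
    have hlen : stem.length = pvStart ts1 + (pvJoin (t :: rest)).length := by
      rw [hpre]; simp [hprelen]
    have hjle : pvStart ts1 ≤ stem.length := by omega
    -- reduce B's raw condition to the suffix form of pvBcond_eq
    have e1 : decide (stem.length ≥ pvStart ts1 + 15)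
        = decide ((pvJoin (t :: rest)).length ≥ 15) := decide_eq_decide.mpr (by omega)
    have e2 : PySem.List.pyGet? stem ((pvStart ts1 : Int) + 8) = (pvJoin (t :: rest))[8]? := by
      rw [show ((pvStart ts1 : Int) + 8) = (((pvStart ts1 + 8 : Nat) : Int)) from by push_cast; ring,
        PySem.List.pyGet?_natCast, hpre, List.getElem?_append_right (by omega), hprelen]
      congr 1
      omega
    have e3 : PySem.List.slice stem (some (pvStart ts1 : Int)) (some ((pvStart ts1 : Int) + 8))
        = (pvJoin (t :: rest)).take 8 := by
      rw [show ((pvStart ts1 : Int) + 8) = ((pvStart ts1 : Int) + ((8 : Nat) : Int)) from by push_cast; ring,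
        PySem.List.slice_natCast_add, hdrop]
    have e4 : PySem.List.slice stem (some ((pvStart ts1 : Int) + 9)) (some ((pvStart ts1 : Int) + 15))
        = ((pvJoin (t :: rest)).drop 9).take 6 := by
      rw [show ((pvStart ts1 : Int) + 9) = (((pvStart ts1 + 9 : Nat) : Int)) from by push_cast; ring,
        show ((pvStart ts1 : Int) + 15) = ((((pvStart ts1 + 9 : Nat)) : Int) + ((6 : Nat) : Int)) from by
          push_cast; ring,
        PySem.List.slice_natCast_add, hpre, List.drop_append,
        List.drop_eq_nil_of_le (by omega), hprelen]
      simp only [List.nil_append]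
      congr 2
      omega
    have e5a : decide (pvStart ts1 + 15 = stem.length)
        = decide ((pvJoin (t :: rest)).length = 15) := decide_eq_decide.mpr (by omega)
    have e5b : PySem.List.pyGet? stem ((pvStart ts1 : Int) + 15) = (pvJoin (t :: rest))[15]? := by
      rw [show ((pvStart ts1 : Int) + 15) = (((pvStart ts1 + 15 : Nat) : Int)) from by push_cast; ring,
        PySem.List.pyGet?_natCast, hpre, List.getElem?_append_right (by omega), hprelen]
      congr 1
      omega
    -- A's raw condition as pvOk?
    have hqv : PySem.List.pyGetD (ts1 ++ t :: rest) ((ts1.length : Int) + 1) [] = rest.headD [] := by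
      rw [show ((ts1.length : Int) + 1) = ((ts1.length + 1 : Nat) : Int) from by push_cast; ring,
        PySem.List.pyGetD_natCast, List.getD_eq_getElem?_getD,
        List.getElem?_append_right (by omega)]
      rw [show ts1.length + 1 - ts1.length = 1 from by omega]
      cases rest <;> simp
    have eA : ((t.length == 8 && PySem.Chars.strIsdigit t
          && decide (ts1.length + 1 < (ts1 ++ t :: rest).length)
          && (PySem.List.pyGetD (ts1 ++ t :: rest) ((ts1.length : Int) + 1) []).length == 6)
          && PySem.Chars.strIsdigit (PySem.List.pyGetD (ts1 ++ t :: rest) ((ts1.length : Int) + 1) []))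
        = pvOk? t rest := by
      rw [hqv]
      cases rest with
      | nil => simp [pvOk?]
      | cons q rs => simp [pvOk?]
    rw [pvB_loop]
    simp only [pvA_loop, e1, e2, e3, e4, e5a, e5b, eA, pvBcond_eq t rest ht hr]
    cases hok : pvOk? t rest with
    | true =>
      rw [if_pos rfl, if_pos rfl]
      -- rest is nonempty, with components of length 8 and 6
      cases rest with
      | nil => simp [pvOk?] at hok
      | cons q rs =>
        have hcomp : ((t.length = 8 ∧ PySem.Chars.strIsdigit t = true) ∧ q.length = 6)
            ∧ PySem.Chars.strIsdigit q = true := by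
          simpa [pvOk?, Bool.and_eq_true] using hok
        obtain ⟨⟨⟨h8, -⟩, h6⟩, -⟩ := hcomp
        have hsufc : pvJoin (t :: q :: rs) = t ++ '_' :: pvJoin (q :: rs) :=
          pvJoin_cons t (q :: rs) (by simp)
        have htake8 : (pvJoin (t :: q :: rs)).take 8 = t := by
          rw [hsufc]; exact List.take_left' h8
        have hdrop9 : (pvJoin (t :: q :: rs)).drop 9 = pvJoin (q :: rs) := by
          rw [hsufc, show t ++ '_' :: pvJoin (q :: rs) = (t ++ ['_']) ++ pvJoin (q :: rs) from by simp,
            List.drop_left' (by simp [h8])]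
        have htake6 : (pvJoin (q :: rs)).take 6 = q := by
          cases rs with
          | nil => show (pvJoin [q]).take 6 = q
                   rw [show pvJoin [q] = q from rfl, ← h6, List.take_length]
          | cons r rs' => rw [pvJoin_cons q (r :: rs') (by simp)]
                          exact List.take_left' h6
        have hAsid : PySem.Chars.join ['_']
            (PySem.List.slice (ts1 ++ t :: q :: rs) (some 1) (some (ts1.length : Int)))
            = pvJoin (ts1.drop 1) := by
          rw [show (1 : Int) = ((1 : Nat) : Int) from by norm_num, PySem.List.slice_natCast,
            pvJoin_eq]
          congr 1
          cases ts1 with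
          | nil => simp
          | cons t0 ts1' =>
            simp only [List.cons_append, List.drop_succ_cons, List.drop_zero, List.length_cons,
              Nat.add_sub_cancel]
            exact List.take_left' rfl
        have hBsid : (if 0 < pvStart ts1 then
              PySem.List.slice stem (some (PySem.Chars.find stem ['_'] + 1))
                (some ((pvStart ts1 : Int) - 1))
            else []) = pvJoin (ts1.drop 1) := by
          cases ts1 with
          | nil => simp [pvStart, pvJoin]
          | cons t0 ts1' =>
            have ht0 : '_' ∉ t0 := hsep t0 (by simp)
            rw [if_pos (by simp [pvStart])]
            have hjval : pvStart (t0 :: ts1') = (pvJoin (t0 :: ts1')).length + 1 := rfl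
            cases ts1' with
            | nil =>
              have hstem' : stem = t0 ++ '_' :: pvJoin (t :: q :: rs) := by
                rw [hstem, pvJoin_append [t0] (t :: q :: rs) (by simp) (by simp)]
                rfl
              rw [hstem', pvFind_eq_len ht0]
              rw [show ((t0.length : Int) + 1) = ((t0.length + 1 : Nat) : Int) from by push_cast; ring,
                show ((pvStart [t0] : Int) - 1) = ((t0.length : Nat) : Int) from by
                  simp [pvStart, pvJoin],
                PySem.List.slice_natCast]
              simp [pvJoin]
            | cons t1 ts1'' =>
              have hj1 : pvJoin (t0 :: t1 :: ts1'') = t0 ++ '_' :: pvJoin (t1 :: ts1'') :=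
                pvJoin_cons t0 (t1 :: ts1'') (by simp)
              have hstem' : stem = (t0 ++ ['_']) ++ (pvJoin (t1 :: ts1'') ++ '_' :: pvJoin (t :: q :: rs)) := by
                rw [hstem, pvJoin_append (t0 :: t1 :: ts1'') (t :: q :: rs) (by simp) (by simp), hj1]
                simp
              have hfind : PySem.Chars.find stem ['_'] = (t0.length : Int) := by
                rw [hstem', show (t0 ++ ['_']) ++ (pvJoin (t1 :: ts1'') ++ '_' :: pvJoin (t :: q :: rs))
                  = t0 ++ '_' :: (pvJoin (t1 :: ts1'') ++ '_' :: pvJoin (t :: q :: rs)) from by simp]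
                exact pvFind_eq_len ht0
              have hjm1 : ((pvStart (t0 :: t1 :: ts1'') : Int) - 1)
                  = (((t0.length + 1 + (pvJoin (t1 :: ts1'')).length : Nat)) : Int) := by
                rw [hjval, hj1]
                push_cast
                simp
                ring
              rw [hfind,
                show ((t0.length : Int) + 1) = ((t0.length + 1 : Nat) : Int) from by push_cast; ring,
                hjm1, PySem.List.slice_natCast, hstem', List.drop_left' (by simp)]
              rw [show t0.length + 1 + (pvJoin (t1 :: ts1'')).length - (t0.length + 1)
                = (pvJoin (t1 :: ts1'')).length from by omega]
              rw [List.take_left' rfl]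
              simp
        refine Prod.ext ?_ ?_
        · show PySem.Chars.join ['_'] _ = _
          rw [hAsid, hBsid]
        · show pvA_iso t (PySem.List.pyGetD (ts1 ++ t :: q :: rs) ((ts1.length : Int) + 1) [])
            = pvB_iso ((pvJoin (t :: q :: rs)).take 8) (((pvJoin (t :: q :: rs)).drop 9).take 6)
          rw [hqv, hdrop9, htake8, htake6]
          exact pvIso_eq t q
    | false =>
      rw [if_neg (by simp)]
      rw [PySem.Chars.findFrom_natCast stem ['_'] (pvStart ts1) hjle, hdrop]
      cases rest with
      | nil =>
        rw [show pvJoin [t] = t from rfl, pvFind_eq_neg_one ht]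
        simp [pvA_loop]
      | cons q rs =>
        have hsufc : pvJoin (t :: q :: rs) = t ++ '_' :: pvJoin (q :: rs) :=
          pvJoin_cons t (q :: rs) (by simp)
        rw [hsufc, pvFind_eq_len ht]
        rw [show (if ((t.length : Int) = -1) then (-1 : Int)
            else ((pvStart ts1 : Int) + (t.length : Int)))
          = ((pvStart ts1 : Int) + (t.length : Int)) from if_neg (by omega)]
        have hne1 : (((pvStart ts1 : Int) + (t.length : Int)) == -1) = false := by
          simp only [beq_eq_false_iff_ne]
          omega
        rw [hne1]
        simp only [Bool.false_eq_true, if_false]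
        have htn : ((pvStart ts1 : Int) + (t.length : Int)).toNat = pvStart ts1 + t.length := by
          omega
        rw [htn]
        have hA : pvA_loop (ts1 ++ t :: q :: rs) (ts1.length + 1) (q :: rs)
            = pvA_loop ((ts1 ++ [t]) ++ q :: rs) ((ts1 ++ [t]).length) (q :: rs) := by
          rw [show (ts1 ++ [t]) ++ q :: rs = ts1 ++ t :: q :: rs from by simp]
          simp
        rw [hA]
        rw [show pvStart ts1 + t.length + 1 = pvStart (ts1 ++ [t]) from by
          rw [pvStart_append_singleton]]
        refine ih (ts1 ++ [t]) f ?_ (by simp) ?_ ?_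
        · intro x hx
          apply hsep
          simpa using hx
        · rw [hstem]
          rw [show (ts1 ++ [t]) ++ q :: rs = ts1 ++ t :: q :: rs from by simp]
        · rw [pvStart_append_singleton]
          have hsuflen : (pvJoin (t :: q :: rs)).length
              = t.length + 1 + (pvJoin (q :: rs)).length := by
            rw [hsufc]; simp; omega
          omega

-- ===== VERDICT (by name: the statement is the Claim_ definition above) =====
theorem parse_thermal_blob_meta_py_spec : Claim_equal_parse_thermal_blob_meta_py := by
  intro filename _
  unfold Spec_parse_thermal_blob_meta_py parse_thermal_blob_meta_py parse_thermal_blob_meta_py_alt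
  simp only
  generalize (if PySem.Chars.endswith filename.toList "_compact.json.gz".toList then
      PySem.List.slice filename.toList none (some (-16))
    else if PySem.Chars.endswith filename.toList "_compact.json".toList then
      PySem.List.slice filename.toList none (some (-13))
    else filename.toList) = stem
  rw [pvSplitOn_eq_tok]
  have h := pvMain stem (pvTok stem) [] (stem.length + 1)
    (by simpa using pvTok_no_sep stem) (pvTok_ne_nil stem)
    (by simpa using (pvTok_join stem).symm)
    (by simp [pvStart])
  simp only [List.nil_append, List.length_nil, pvStart] at h
  rw [h]
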